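-- pv_equiv track=rewrite | github.com/C10udburst/mimuw-laby-22 | 2023/AKSO/sum/sum_eval.py | make_yarray
-- ===== SOURCE A (Python) =====
-- def chunks(xs, n):
--     n = max(1, n)
--     return (xs[i:i+n] for i in range(0, len(xs), n))
--
-- def n_ff(n):
--     return int("ff"*n, 16)
--
-- def make_yarray(y, n):
--     y_array = []
--     yhex = hex(y & n_ff(len(hex(y))-2))[2:]
--     chars = 64*2//8
--     while len(yhex)//chars < n:
--         yhex = ('0' if y >= 0 else 'f') + yhex
--     for chunk in chunks(yhex, chars):
--         y_array.append(int(chunk, 16))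
--     return y_array[::-1]
-- ===== SOURCE B (Python) =====
-- def make_yarray(y, n):
--     MASK = (1 << 64) - 1
--     words = [y & MASK]
--     v = y >> 64
--     while v != 0 and v != -1:
--         words.append(v & MASK)
--         v >>= 64
--     filler = 0 if y >= 0 else MASK
--     while len(words) < n:
--         words.append(filler)
--     return words
-- ===== Notes on version B (the rewrite author's own statement) =====
-- stated objective: faster
-- what changed: A formats the masked integer as a hex string, pads it one character at a time in a loop and re-parses 16-char slices with int(,16); B never builds a string: it extracts 64-bit little-endian words directly with & and >> until the sign-extension fixpoint, then appends sign-filler words up to n.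
-- intended difference: For y<0 with n<=0 (except when 16^6 <= -y < 16^7) or with n=1 and -y >= 16^7, A returns a word list of accidental width 2*(hexdigits(-y)+1) hex digits -- derived from counting the '-' sign in len(hex(y)) -- with a misaligned short low chunk (e.g. A(-1,0)=[65535]); B returns proper 64-bit two's-complement words ([2^64-1] for (-1,0)), the intended value for a 64-bit word array. — e.g. on make_yarray(-1, 0): A returns [65535], B returns [18446744073709551615]
import Mathlib
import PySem

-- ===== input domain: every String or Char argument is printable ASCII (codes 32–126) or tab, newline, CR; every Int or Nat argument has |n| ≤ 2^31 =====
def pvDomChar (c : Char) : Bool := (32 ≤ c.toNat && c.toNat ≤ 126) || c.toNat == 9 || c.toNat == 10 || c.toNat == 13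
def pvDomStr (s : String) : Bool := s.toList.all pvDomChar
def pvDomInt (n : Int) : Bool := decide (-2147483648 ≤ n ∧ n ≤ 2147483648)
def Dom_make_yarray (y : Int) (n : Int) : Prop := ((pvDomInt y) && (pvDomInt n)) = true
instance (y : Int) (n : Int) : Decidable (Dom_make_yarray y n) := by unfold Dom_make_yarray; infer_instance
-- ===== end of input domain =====

-- B replaces A's hex-string formatting/slicing/parsing round trip by direct 64-bit word
-- extraction with masking and shifting (simpler, no strings); on a degenerate corner
-- (y < 0 with n ≤ 1, see D_ below) A's accidental word width differs and B's value is the intended one.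

-- ===== PORT A =====
-- lowercase hex digit character for d < 16 (as CPython's hex() produces)
def hexDigitChar (d : Nat) : Char := if d < 10 then Char.ofNat (48 + d) else Char.ofNat (87 + d)

-- hex digits of v, most significant first; [] for 0 (structural recursion on a fuel
-- counter that bounds the digit count; fuel = v always suffices since v/16 < v)
def hexDigitsGo : Nat → Nat → List Char
  | 0, _ => []
  | fuel + 1, v => if v = 0 then [] else hexDigitsGo fuel (v / 16) ++ [hexDigitChar (v % 16)]

def hexDigitsAux (v : Nat) : List Char := hexDigitsGo v v

def pyHexNat (v : Nat) : List Char := if v = 0 then ['0'] else hexDigitsAux v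

-- hex(x), as its list of characters; exact port of CPython's hex() ("0x…" / "-0x…")
def pyHexChars (x : Int) : List Char :=
  if x < 0 then ['-', '0', 'x'] ++ pyHexNat (-x).toNat else ['0', 'x'] ++ pyHexNat x.toNat

-- value of one lowercase hex digit; exact for '0'-'9','a'-'f'
def hexDigitVal (c : Char) : Nat := if 97 ≤ c.toNat then c.toNat - 87 else c.toNat - 48

-- int(s, 16): exact for the strings A feeds it (nonempty, lowercase hex digits only)
def parseHex (cs : List Char) : Int := cs.foldl (fun acc c => acc * 16 + (hexDigitVal c : Int)) 0

-- int("ff"*n, 16); A only calls it with n ≥ 1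
def n_ff (n : Int) : Int := parseHex (List.replicate n.toNat ['f', 'f']).flatten

-- chunks(xs, n): (xs[i:i+n] for i in range(0, len(xs), n))
def chunksA (xs : List Char) (n : Int) : List (List Char) :=
  let n := max 1 n
  (PySem.List.pyRange 0 xs.length n).map fun i => PySem.List.slice xs (some i) (some (i + n))

-- while len(yhex)//chars < n: yhex = ('0' if y >= 0 else 'f') + yhex   (chars = 64*2//8 = 16)
-- (structural recursion on a fuel counter equal to the exact number of iterations;
-- when the fuel is 0 the loop condition is false, so semantics are unchanged)
def padGo (y n : Int) : Nat → List Char → List Char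
  | 0, cs => cs
  | fuel + 1, cs =>
    if PySem.Int.floordiv (cs.length : Int) 16 < n then
      padGo y n fuel ((if 0 ≤ y then '0' else 'f') :: cs)
    else cs

def padLoop (y n : Int) (yhex : List Char) : List Char :=
  padGo y n (16 * n - yhex.length).toNat yhex

def make_yarray (y : Int) (n : Int) : List Int :=
  let yhex0 := PySem.List.slice
    (pyHexChars (PySem.Int.band y (n_ff (((pyHexChars y).length : Int) - 2)))) (some 2) none
  let chars : Int := PySem.Int.floordiv (64 * 2) 8
  let yhex := padLoop y n yhex0
  -- y_array[::-1] is reversal (PySem.List.slice?_none_none_neg_one)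
  ((chunksA yhex chars).map parseHex).reverse

-- ===== PORT B =====
-- while v != 0 and v != -1: words.append(v & MASK); v >>= 64
-- (v >> 64 is arithmetic shift = floor division by 2^64; exact)
-- (structural recursion on a fuel counter = |v|, which bounds the iteration count;
-- fuel 0 forces v = 0, where the loop condition is false, so semantics are unchanged)
def bGo : Nat → Int → List Int
  | 0, _ => []
  | fuel + 1, v =>
    if v ≠ 0 ∧ v ≠ -1 then
      PySem.Int.band v (2 ^ 64 - 1) :: bGo fuel (PySem.Int.floordiv v (2 ^ 64))
    else []

def bLoop (v : Int) : List Int := bGo v.natAbs v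

-- while len(words) < n: words.append(filler)
-- (structural recursion on a fuel counter equal to the exact number of iterations)
def padBGo (filler : Int) (n : Int) : Nat → List Int → List Int
  | 0, ws => ws
  | fuel + 1, ws => if (ws.length : Int) < n then padBGo filler n fuel (ws ++ [filler]) else ws

def padB (filler : Int) (n : Int) (ws : List Int) : List Int :=
  padBGo filler n (n - ws.length).toNat ws

def make_yarray_alt (y : Int) (n : Int) : List Int :=
  let mask : Int := 2 ^ 64 - 1
  let words := [PySem.Int.band y mask]
  let words := words ++ bLoop (PySem.Int.floordiv y (2 ^ 64))
  let filler : Int := if 0 ≤ y then 0 else mask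
  padB filler n words

-- ===== PRECONDITION & SPEC =====
-- For y<0 with n ≤ 0 (except when 16^6 ≤ -y < 16^7) or with n = 1 and -y ≥ 16^7, A returns a word
-- list of accidental width 2*(hexdigits(-y)+1) hex digits — from counting the '-' sign in
-- len(hex(y)) — with a misaligned short low chunk (e.g. A(-1,0) = [65535]); B returns proper 64-bit
-- two's-complement words ([2^64-1] there), the intended value for a 64-bit word array.
def D_make_yarray (y : Int) (n : Int) : Prop :=
  y < 0 ∧ ((n ≤ 0 ∧ ¬(16 ^ 6 ≤ -y ∧ -y < 16 ^ 7)) ∨ (n = 1 ∧ 16 ^ 7 ≤ -y))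
instance (y : Int) (n : Int) : Decidable (D_make_yarray y n) := by unfold D_make_yarray; infer_instance

def Spec_make_yarray (y : Int) (n : Int) (out : List Int) : Prop :=
  ¬ D_make_yarray y n → out = make_yarray_alt y n
instance (y : Int) (n : Int) (out : List Int) : Decidable (Spec_make_yarray y n out) := by unfold Spec_make_yarray; infer_instance

def pvDiffWitness_make_yarray : Int × Int := (-1, 0)
def pvDiffWitnessOut_make_yarray : (List Int) × (List Int) := ([65535], [18446744073709551615])

-- ===== CLAIM (what is proved, stated in full; the proofs are below) =====
def Claim_unchanged_make_yarray : Prop := ∀ (y : Int) (n : Int), Dom_make_yarray y n → Spec_make_yarray y n (make_yarray y n)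
def Claim_changed_make_yarray : Prop := Dom_make_yarray (pvDiffWitness_make_yarray.1) (pvDiffWitness_make_yarray.2) ∧ D_make_yarray (pvDiffWitness_make_yarray.1) (pvDiffWitness_make_yarray.2) ∧ make_yarray (pvDiffWitness_make_yarray.1) (pvDiffWitness_make_yarray.2) = pvDiffWitnessOut_make_yarray.1 ∧ make_yarray_alt (pvDiffWitness_make_yarray.1) (pvDiffWitness_make_yarray.2) = pvDiffWitnessOut_make_yarray.2 ∧ pvDiffWitnessOut_make_yarray.1 ≠ pvDiffWitnessOut_make_yarray.2
def Claim_exact_make_yarray : Prop := ∀ (y : Int) (n : Int), Dom_make_yarray y n → D_make_yarray y n → make_yarray y n ≠ make_yarray_alt y n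

-- ===== LEMMAS AND PROOFS =====

-- A's chunk list after reversal, expressed as word extraction from value V and digit count L
def wordsGo (m L : Int) : List Int :=
  if 0 < L then PySem.Int.mod m (2 ^ 64) :: wordsGo (PySem.Int.floordiv m (2 ^ 64)) (L - 16) else []
termination_by L.toNat
decreasing_by omega

def bTail (V L : Int) : List Int :=
  if PySem.Int.mod L 16 ≠ 0 then
    PySem.Int.mod V (16 ^ (PySem.Int.mod L 16).toNat) ::
      wordsGo (PySem.Int.floordiv V (16 ^ (PySem.Int.mod L 16).toNat)) (L - PySem.Int.mod L 16)
  else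
    wordsGo V L

theorem hexDigitsGo_congr : ∀ (v f1 f2 : Nat), v ≤ f1 → v ≤ f2 →
    hexDigitsGo f1 v = hexDigitsGo f2 v := by
  intro v
  induction v using Nat.strong_induction_on with
  | _ v ih =>
    intro f1 f2 h1 h2
    cases f1 with
    | zero =>
      have hv : v = 0 := by omega
      subst hv
      cases f2 with
      | zero => rfl
      | succ g => simp [hexDigitsGo]
    | succ g1 =>
      cases f2 with
      | zero =>
        have hv : v = 0 := by omega
        subst hv
        simp [hexDigitsGo]
      | succ g2 =>
        simp only [hexDigitsGo]
        by_cases hv : v = 0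
        · rw [if_pos hv, if_pos hv]
        · rw [if_neg hv, if_neg hv]
          have hlt : v / 16 < v := Nat.div_lt_self (Nat.pos_of_ne_zero hv) (by norm_num)
          rw [ih (v / 16) hlt g1 g2 (by omega) (by omega)]

theorem hexDigitsAux_eq (v : Nat) :
    hexDigitsAux v = if v = 0 then [] else hexDigitsAux (v / 16) ++ [hexDigitChar (v % 16)] := by
  unfold hexDigitsAux
  cases v with
  | zero => rfl
  | succ w =>
    simp only [hexDigitsGo, Nat.succ_ne_zero, if_false]
    rw [hexDigitsGo_congr ((w + 1) / 16) w ((w + 1) / 16) (by omega) le_rfl]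

theorem foldl_parse (cs : List Char) (acc : Int) :
    cs.foldl (fun acc c => acc * 16 + (hexDigitVal c : Int)) acc
      = acc * 16 ^ cs.length + parseHex cs := by
  induction cs generalizing acc with
  | nil => simp [parseHex]
  | cons c t ih =>
    simp only [List.foldl_cons, List.length_cons, parseHex]
    rw [ih, ih (0 * 16 + (hexDigitVal c : Int))]
    ring

theorem parseHex_append (a b : List Char) :
    parseHex (a ++ b) = parseHex a * 16 ^ b.length + parseHex b := by
  show (a ++ b).foldl _ 0 = _
  rw [List.foldl_append, foldl_parse]
  rfl

theorem parseHex_nonneg (cs : List Char) : 0 ≤ parseHex cs := by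
  induction cs using List.reverseRecOn with
  | nil => simp [parseHex]
  | append_singleton a c ih =>
    rw [parseHex_append]
    simp only [List.length_cons, List.length_nil]
    have : (0:Int) ≤ (hexDigitVal c : Int) := Int.natCast_nonneg _
    have h16 : (0:Int) ≤ parseHex a * 16 ^ 1 := by positivity
    simp [parseHex] at *
    omega

theorem parseHex_lt (cs : List Char) (h : ∀ c ∈ cs, hexDigitVal c < 16) :
    parseHex cs < 16 ^ cs.length := by
  induction cs using List.reverseRecOn with
  | nil => simp [parseHex]
  | append_singleton a c ih =>
    rw [parseHex_append]
    have hc : (hexDigitVal c : Int) < 16 := by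
      exact_mod_cast h c (by simp)
    have ha : parseHex a < 16 ^ a.length := ih fun x hx => h x (by simp [hx])
    have h0 : (0:Int) ≤ (hexDigitVal c : Int) := Int.natCast_nonneg _
    have h1 : parseHex [c] = (hexDigitVal c : Int) := by simp [parseHex]
    simp only [List.length_append, List.length_cons, List.length_nil, h1, pow_succ, pow_zero]
    nlinarith [parseHex_nonneg a]

theorem hexDigitVal_hexDigitChar (d : Nat) (h : d < 16) : hexDigitVal (hexDigitChar d) = d := by
  interval_cases d <;> decide

theorem parseHex_pyHexNat (v : Nat) : parseHex (pyHexNat v) = v := by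
  have aux : ∀ v : Nat, parseHex (hexDigitsAux v) = v := by
    intro v
    induction v using Nat.strong_induction_on with
    | _ v ih =>
      rw [hexDigitsAux_eq]
      split
      · simp [parseHex]; omega
      · rename_i hv
        rw [parseHex_append, ih (v / 16) (Nat.div_lt_self (Nat.pos_of_ne_zero hv) (by norm_num))]
        have : parseHex [hexDigitChar (v % 16)] = ((v % 16 : Nat) : Int) := by
          simp [parseHex, hexDigitVal_hexDigitChar _ (Nat.mod_lt _ (by norm_num))]
        simp only [List.length_cons, List.length_nil, this]
        omega
  unfold pyHexNat
  split
  · simp [parseHex, hexDigitVal]; omega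
  · exact aux v

theorem valid_pyHexNat (v : Nat) : ∀ c ∈ pyHexNat v, hexDigitVal c < 16 := by
  have aux : ∀ v : Nat, ∀ c ∈ hexDigitsAux v, hexDigitVal c < 16 := by
    intro v
    induction v using Nat.strong_induction_on with
    | _ v ih =>
      rw [hexDigitsAux_eq]
      split
      · simp
      · rename_i hv
        intro c hc
        rcases List.mem_append.1 hc with h | h
        · exact ih (v / 16) (Nat.div_lt_self (Nat.pos_of_ne_zero hv) (by norm_num)) c h
        · simp at h
          subst h
          rw [hexDigitVal_hexDigitChar _ (Nat.mod_lt _ (by norm_num))]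
          exact Nat.mod_lt _ (by norm_num)
  unfold pyHexNat
  split
  · intro c hc
    simp at hc
    subst hc
    decide
  · exact aux v

theorem length_pyHexNat_pos (v : Nat) : 0 < (pyHexNat v).length := by
  unfold pyHexNat
  split
  · simp
  · rename_i hv
    rw [hexDigitsAux_eq]
    simp [hv]

theorem pyHexNat_len_step (v : Nat) (hv : 16 ≤ v) :
    (pyHexNat v).length = (pyHexNat (v / 16)).length + 1 := by
  have h1 : v ≠ 0 := by omega
  have h2 : v / 16 ≠ 0 := by omega
  rw [pyHexNat, if_neg h1, hexDigitsAux_eq, if_neg h1, pyHexNat, if_neg h2]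
  simp

theorem pyHexNat_len_one (v : Nat) (hv : v < 16) : (pyHexNat v).length = 1 := by
  by_cases h1 : v = 0
  · subst h1; rfl
  · have h2 : v / 16 = 0 := by omega
    rw [pyHexNat, if_neg h1, hexDigitsAux_eq, if_neg h1, h2]
    simp [show hexDigitsAux 0 = [] from rfl]

theorem pyHexNat_lt_pow (v : Nat) : v < 16 ^ (pyHexNat v).length := by
  induction v using Nat.strong_induction_on with
  | _ v ih =>
    by_cases hv : v < 16
    · rw [pyHexNat_len_one v hv]
      omega
    · rw [pyHexNat_len_step v (by omega)]
      have h := ih (v / 16) (Nat.div_lt_self (by omega) (by norm_num))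
      have : 16 ^ ((pyHexNat (v / 16)).length + 1) = 16 * 16 ^ (pyHexNat (v / 16)).length := by
        ring
      omega

theorem pyHexNat_pow_le (v : Nat) (hv : 1 ≤ v) : 16 ^ ((pyHexNat v).length - 1) ≤ v := by
  induction v using Nat.strong_induction_on with
  | _ v ih =>
    by_cases hlt : v < 16
    · rw [pyHexNat_len_one v hlt]
      simpa using hv
    · rw [pyHexNat_len_step v (by omega)]
      have hq : 1 ≤ v / 16 := by omega
      have h := ih (v / 16) (Nat.div_lt_self (by omega) (by norm_num)) hq
      have hp := length_pyHexNat_pos (v / 16)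
      have he : (pyHexNat (v / 16)).length + 1 - 1 = ((pyHexNat (v / 16)).length - 1) + 1 := by
        omega
      rw [he, pow_succ]
      have : 16 ^ ((pyHexNat (v / 16)).length - 1) * 16 ≤ (v / 16) * 16 := by
        exact Nat.mul_le_mul_right 16 h
      omega

theorem pyHexNat_len_eq (v k : Nat) (h1 : 16 ^ k ≤ v) (h2 : v < 16 ^ (k + 1)) :
    (pyHexNat v).length = k + 1 := by
  have hv1 : 1 ≤ v := le_trans (Nat.one_le_pow _ _ (by norm_num)) h1
  have hlo := pyHexNat_pow_le v hv1
  have hhi := pyHexNat_lt_pow v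
  have hp := length_pyHexNat_pos v
  set l := (pyHexNat v).length with hl
  have c1 : k < l := by
    by_contra hc
    have : 16 ^ l ≤ 16 ^ k := Nat.pow_le_pow_right (by norm_num) (by omega)
    omega
  have c2 : l ≤ k + 1 := by
    by_contra hc
    have : 16 ^ (k + 1) ≤ 16 ^ (l - 1) := Nat.pow_le_pow_right (by norm_num) (by omega)
    omega
  omega

theorem pyHexNat_len_le (v k : Nat) (hk : 1 ≤ k) (h : v < 16 ^ k) :
    (pyHexNat v).length ≤ k := by
  by_cases hv : v = 0
  · subst hv
    simpa [pyHexNat] using hk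
  · have hlo := pyHexNat_pow_le v (by omega)
    by_contra hc
    have : 16 ^ k ≤ 16 ^ ((pyHexNat v).length - 1) :=
      Nat.pow_le_pow_right (by norm_num) (by omega)
    omega

theorem parseHex_replicate_f (p : Nat) : parseHex (List.replicate p 'f') = 16 ^ p - 1 := by
  induction p with
  | zero => simp [parseHex]
  | succ p ih =>
    rw [List.replicate_succ', parseHex_append, ih]
    have : parseHex ['f'] = 15 := by decide
    simp only [List.length_cons, List.length_nil, this, pow_succ]
    ring

theorem parseHex_replicate_0 (p : Nat) : parseHex (List.replicate p '0') = 0 := by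
  induction p with
  | zero => simp [parseHex]
  | succ p ih =>
    rw [List.replicate_succ', parseHex_append, ih]
    decide

theorem n_ff_eq (k : Nat) : n_ff (k : Int) = 16 ^ (2 * k) - 1 := by
  have hflat : ∀ k : Nat, (List.replicate k ['f', 'f']).flatten = List.replicate (2 * k) 'f' := by
    intro k
    induction k with
    | zero => rfl
    | succ k ih =>
      rw [List.replicate_succ, List.flatten_cons, ih]
      have : 2 * (k + 1) = 2 + 2 * k := by ring
      rw [this, List.replicate_add]
      rfl
  rw [n_ff, Int.toNat_natCast, hflat, parseHex_replicate_f]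

theorem band_mask (a : Int) (t : Nat) :
    PySem.Int.band a (2 ^ t - 1) = PySem.Int.mod a (2 ^ t) := by
  have hP : (0:Int) < 2 ^ t := by positivity
  have hcast : ((2 ^ t : Nat) : Int) = 2 ^ t := by push_cast; try ring
  rw [PySem.Int.mod, Int.fmod_eq_emod_of_nonneg a (by positivity)]
  unfold PySem.Int.band
  by_cases ha : 0 ≤ a
  · rw [if_pos ha, if_pos (by omega)]
    have h1 : ((2:Int) ^ t - 1).toNat = 2 ^ t - 1 := by omega
    rw [h1, Nat.and_two_pow_sub_one_eq_mod]
    have h2 : ((a.toNat % 2 ^ t : Nat) : Int) = (a.toNat : Int) % ((2 ^ t : Nat) : Int) := by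
      push_cast
      ring
    rw [h2, hcast, Int.toNat_of_nonneg ha]
  · rw [if_neg ha, if_pos (by omega)]
    have h1 : ((2:Int) ^ t - 1).toNat = 2 ^ t - 1 := by omega
    rw [h1, Nat.and_comm, Nat.and_two_pow_sub_one_eq_mod]
    set wn := (-a - 1).toNat with hwn
    have hw : (wn : Int) = -a - 1 := by omega
    have hmodcast : ((wn % 2 ^ t : Nat) : Int) = (wn : Int) % 2 ^ t := by
      push_cast
      ring
    have hm0 : 0 ≤ (wn : Int) % 2 ^ t := Int.emod_nonneg _ (by omega)
    have hm1 : (wn : Int) % 2 ^ t < 2 ^ t := Int.emod_lt_of_pos _ hP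
    have key : a % 2 ^ t = 2 ^ t - 1 - (wn : Int) % 2 ^ t := by
      have ha' : a = -(wn : Int) - 1 := by omega
      rw [ha']
      calc (-(wn:Int) - 1) % 2 ^ t
          = (2 ^ t - 1 - (wn:Int) % 2 ^ t) % 2 ^ t := by
            rw [Int.emod_eq_emod_iff_emod_sub_eq_zero]
            have h2 : (-(wn:Int) - 1) - (2 ^ t - 1 - (wn:Int) % 2 ^ t)
                = (2 ^ t) * (-((wn:Int) / 2 ^ t) - 1) := by
              rw [Int.emod_def]
              ring
            rw [h2, Int.mul_emod_right]
        _ = 2 ^ t - 1 - (wn:Int) % 2 ^ t := Int.emod_eq_of_lt (by omega) (by omega)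
    rw [key]
    omega

theorem padGo_spec (y n : Int) (fuel : Nat) :
    ∀ cs : List Char, (16 * n - cs.length).toNat ≤ fuel →
      padGo y n fuel cs
        = List.replicate (16 * n - cs.length).toNat (if 0 ≤ y then '0' else 'f') ++ cs := by
  induction fuel with
  | zero =>
    intro cs h
    have h0 : (16 * n - (cs.length : Int)).toNat = 0 := by omega
    simp [padGo, h0]
  | succ fuel ih =>
    intro cs h
    simp only [padGo]
    by_cases hc : PySem.Int.floordiv (cs.length : Int) 16 < n
    · rw [if_pos hc]
      have hc' := hc
      rw [PySem.Int.floordiv_lt_iff_lt_mul (by norm_num)] at hc'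
      rw [ih _ (by simp only [List.length_cons]; push_cast; omega)]
      have h1 : (16 * n - ((if 0 ≤ y then '0' else 'f') :: cs).length).toNat + 1
          = (16 * n - cs.length).toNat := by
        simp only [List.length_cons]
        push_cast
        omega
      rw [← h1, List.replicate_succ']
      simp
    · rw [if_neg hc]
      rw [PySem.Int.floordiv_lt_iff_lt_mul (by norm_num), not_lt] at hc
      have h0 : (16 * n - (cs.length : Int)).toNat = 0 := by omega
      rw [h0]
      rfl

theorem padLoop_eq (y n : Int) (cs : List Char) :
    padLoop y n cs
      = List.replicate (16 * n - cs.length).toNat (if 0 ≤ y then '0' else 'f') ++ cs := by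
  unfold padLoop
  exact padGo_spec y n _ cs le_rfl

theorem chunksA_nil : chunksA [] 16 = [] := by
  rfl

theorem chunksA_cons (xs : List Char) (h : xs ≠ []) :
    chunksA xs 16 = xs.take 16 :: chunksA (xs.drop 16) 16 := by
  have hlen : 0 < xs.length := List.length_pos_iff.2 h
  unfold chunksA
  simp only [show max (1:Int) 16 = 16 from by norm_num]
  rw [PySem.List.pyRange_of_pos _ _ (by norm_num : (0:Int) < 16),
    PySem.List.pyRange_of_pos _ _ (by norm_num : (0:Int) < 16)]
  have hc1 : (if (0:Int) < (xs.length : Int) then (((xs.length : Int) - 0 + 16 - 1) / 16).toNat else 0)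
      = (xs.length + 15) / 16 := by
    rw [if_pos (by exact_mod_cast hlen)]
    omega
  rw [hc1]
  by_cases hle : xs.length ≤ 16
  · have hd : xs.drop 16 = [] := List.drop_eq_nil_of_le (by omega)
    have hc2 : (xs.length + 15) / 16 = 1 := by omega
    rw [hc2, hd]
    simp only [List.length_nil, Nat.cast_zero, lt_irrefl, if_false, List.range_zero,
      List.map_nil, List.range_one, List.map_cons, List.map_nil]
    norm_num
    rw [PySem.List.slice_to (xs := xs) (b := 16) (by norm_num)]
    rw [List.take_of_length_le (by norm_num [hle] : xs.length ≤ (16:Int).toNat),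
      List.take_of_length_le hle]
  · rw [not_le] at hle
    have hdlen : (xs.drop 16).length = xs.length - 16 := by simp
    have hc2 : (if (0:Int) < ((xs.drop 16).length : Int)
        then ((((xs.drop 16).length : Int) - 0 + 16 - 1) / 16).toNat else 0)
        = (xs.length - 16 + 15) / 16 := by
      rw [if_pos (by simp; omega), hdlen]
      omega
    rw [hc2]
    have hsplit : (xs.length + 15) / 16 = ((xs.length - 16 + 15) / 16) + 1 := by omega
    rw [hsplit, List.range_succ_eq_map]
    simp only [List.map_cons, List.map_map]
    congr 1
    · norm_num
      rw [PySem.List.slice_to (xs := xs) (b := 16) (by norm_num)]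
      rfl
    · apply List.map_congr_left
      intro k _
      simp only [Function.comp_apply, Nat.succ_eq_add_one]
      have e1 : (0:Int) + 16 * ((k + 1 : Nat) : Int) = ((16 * k + 16 : Nat) : Int) := by push_cast; try ring
      have e2 : (0:Int) + 16 * ((k + 1 : Nat) : Int) + 16
          = ((16 * k + 16 : Nat) : Int) + ((16:Nat) : Int) := by push_cast; try ring
      have e3 : (0:Int) + 16 * ((k : Nat) : Int) = ((16 * k : Nat) : Int) := by push_cast; try ring
      have e4 : (0:Int) + 16 * ((k : Nat) : Int) + 16 = ((16 * k : Nat) : Int) + ((16:Nat) : Int) := by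
        push_cast; try ring
      rw [e2, e1, e4, e3, ← Nat.cast_add, ← Nat.cast_add, PySem.List.slice_natCast,
        PySem.List.slice_natCast, List.drop_drop]
      congr 1
      · omega
      · congr 1
        omega

theorem wordsGo_stop (m : Int) : wordsGo m 0 = [] := by
  rw [wordsGo]
  simp

theorem wordsGo_step (p u : Int) (T : Nat) (hdvd : 16 ∣ T) (hp0 : 0 ≤ p) (hp : p < 2 ^ 64)
    (hu0 : 0 ≤ u) (hu : u < 16 ^ T) :
    wordsGo (p * 16 ^ T + u) ((T : Int) + 16) = wordsGo u T ++ [p] := by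
  induction T using Nat.strong_induction_on generalizing p u with
  | _ T ih =>
    by_cases hT : T = 0
    · subst hT
      have hu' : u = 0 := by
        simp at hu
        omega
      subst hu'
      rw [wordsGo]
      rw [if_pos (by norm_num)]
      have e1 : PySem.Int.mod (p * 16 ^ 0 + 0) (2 ^ 64) = p := by
        rw [PySem.Int.mod, Int.fmod_eq_emod_of_nonneg _ (by positivity)]
        simp
        exact Int.emod_eq_of_lt hp0 hp
      have e2 : PySem.Int.floordiv (p * 16 ^ 0 + 0) (2 ^ 64) = 0 := by
        rw [PySem.Int.floordiv_eq_ediv_of_pos (by positivity)]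
        simp
        exact Int.ediv_eq_zero_of_lt hp0 hp
      rw [e1, e2]
      norm_num [wordsGo_stop]
    · obtain ⟨T', hT'⟩ : ∃ T', T = 16 + T' := by
        obtain ⟨c, hc⟩ := hdvd
        exact ⟨16 * (c - 1), by omega⟩
      subst hT'
      have hdvd' : 16 ∣ T' := by omega
      have hpow : (16:Int) ^ (16 + T') = 2 ^ 64 * 16 ^ T' := by
        rw [pow_add]
        norm_num
      have h2 : (0:Int) < 2 ^ 64 := by positivity
      have hq0 : 0 ≤ u / 2 ^ 64 := Int.ediv_nonneg hu0 (by positivity)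
      have hqlt : u / 2 ^ 64 < 16 ^ T' := by
        rw [Int.ediv_lt_iff_lt_mul h2]
        rw [hpow] at hu
        linarith [hu]
      rw [wordsGo, if_pos (by positivity)]
      have e1 : PySem.Int.mod (p * 16 ^ (16 + T') + u) (2 ^ 64) = PySem.Int.mod u (2 ^ 64) := by
        rw [PySem.Int.mod, PySem.Int.mod, Int.fmod_eq_emod_of_nonneg _ (by positivity),
          Int.fmod_eq_emod_of_nonneg _ (by positivity)]
        have : p * 16 ^ (16 + T') + u = u + 2 ^ 64 * (p * 16 ^ T') := by
          rw [hpow]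
          ring
        rw [this, Int.add_mul_emod_self_left]
      have e2 : PySem.Int.floordiv (p * 16 ^ (16 + T') + u) (2 ^ 64)
          = p * 16 ^ T' + u / 2 ^ 64 := by
        rw [PySem.Int.floordiv_eq_ediv_of_pos h2]
        have : p * 16 ^ (16 + T') + u = u + 2 ^ 64 * (p * 16 ^ T') := by
          rw [hpow]
          ring
        rw [this, Int.add_mul_ediv_left _ _ (by positivity : (2:Int) ^ 64 ≠ 0)]
        ring
      rw [e1, e2]
      have harg : ((16 + T' : Nat) : Int) + 16 - 16 = ((T' : Int)) + 16 := by push_cast; try ring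
      rw [harg, ih T' (by omega) p (u / 2 ^ 64) hdvd' hp0 hp hq0 hqlt]
      conv_rhs => rw [wordsGo]
      rw [if_pos (show (0:Int) < ((16 + T' : Nat) : Int) by push_cast; omega)]
      have harg2 : ((16 + T' : Nat) : Int) - 16 = ((T' : Int)) := by push_cast; try ring
      rw [harg2]
      have e3 : PySem.Int.floordiv u (2 ^ 64) = u / 2 ^ 64 := PySem.Int.floordiv_eq_ediv_of_pos h2
      rw [e3]
      simp

theorem bTail_step (p w : Int) (T : Nat) (hp0 : 0 ≤ p) (hp : p < 16 ^ 16)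
    (hw0 : 0 ≤ w) (hw : w < 16 ^ T) (_hT : 0 < T) :
    bTail (p * 16 ^ T + w) ((T : Int) + 16) = bTail w T ++ [p] := by
  have h1616 : (16:Int) ^ 16 = 2 ^ 64 := by norm_num
  have hr1 : PySem.Int.mod ((T:Int) + 16) 16 = ((T % 16 : Nat) : Int) := by
    rw [PySem.Int.mod, Int.fmod_eq_emod_of_nonneg _ (by norm_num)]
    omega
  have hr2 : PySem.Int.mod (T:Int) 16 = ((T % 16 : Nat) : Int) := by
    rw [PySem.Int.mod, Int.fmod_eq_emod_of_nonneg _ (by norm_num)]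
    omega
  unfold bTail
  rw [hr1, hr2]
  by_cases hr0 : T % 16 = 0
  · rw [if_neg (by simp [hr0]), if_neg (by simp [hr0])]
    exact wordsGo_step p w T (Nat.dvd_of_mod_eq_zero hr0) hp0 (by omega) hw0 hw
  · have hrne : ((T % 16 : Nat) : Int) ≠ 0 := by
      exact_mod_cast Nat.cast_ne_zero.mpr hr0
    rw [if_pos hrne, if_pos hrne]
    have htn : (((T % 16 : Nat) : Int)).toNat = T % 16 := by omega
    rw [htn]
    set r := T % 16 with hrdef
    have hrle : r ≤ T := Nat.mod_le _ _
    have hpowr : (0:Int) < 16 ^ r := by positivity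
    have hsplitpow : (16:Int) ^ T = 16 ^ r * 16 ^ (T - r) := by
      rw [← pow_add]
      congr 1
      omega
    have hV : p * 16 ^ T + w = w + 16 ^ r * (p * 16 ^ (T - r)) := by
      rw [hsplitpow]
      ring
    have e1 : PySem.Int.mod (p * 16 ^ T + w) (16 ^ r) = PySem.Int.mod w (16 ^ r) := by
      rw [PySem.Int.mod, PySem.Int.mod, Int.fmod_eq_emod_of_nonneg _ (by positivity),
        Int.fmod_eq_emod_of_nonneg _ (by positivity), hV, Int.add_mul_emod_self_left]
    have e2 : PySem.Int.floordiv (p * 16 ^ T + w) (16 ^ r)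
        = w / 16 ^ r + p * 16 ^ (T - r) := by
      rw [PySem.Int.floordiv_eq_ediv_of_pos hpowr, hV,
        Int.add_mul_ediv_left _ _ (by positivity : (16:Int) ^ r ≠ 0)]
    have e3 : PySem.Int.floordiv w (16 ^ r) = w / 16 ^ r :=
      PySem.Int.floordiv_eq_ediv_of_pos hpowr
    rw [e1, e2, e3]
    have harg : (T:Int) + 16 - ((r : Nat) : Int) = ((T - r : Nat) : Int) + 16 := by omega
    have harg2 : (T:Int) - ((r : Nat) : Int) = ((T - r : Nat) : Int) := by omega
    rw [harg, harg2]
    have hq0 : 0 ≤ w / 16 ^ r := Int.ediv_nonneg hw0 (by positivity)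
    have hqlt : w / 16 ^ r < 16 ^ (T - r) := by
      rw [Int.ediv_lt_iff_lt_mul hpowr]
      rw [hsplitpow] at hw
      linarith [hw]
    have hdvd : 16 ∣ (T - r) := ⟨T / 16, by omega⟩
    rw [add_comm (w / 16 ^ r) (p * 16 ^ (T - r)),
      wordsGo_step p (w / 16 ^ r) (T - r) hdvd hp0 (by omega) hq0 hqlt]
    simp

theorem AW_eq (cs : List Char) (hval : ∀ c ∈ cs, hexDigitVal c < 16) (hne : cs ≠ []) :
    ((chunksA cs 16).map parseHex).reverse = bTail (parseHex cs) cs.length := by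
  suffices H : ∀ N, ∀ cs : List Char, cs.length = N → (∀ c ∈ cs, hexDigitVal c < 16) → cs ≠ [] →
      ((chunksA cs 16).map parseHex).reverse = bTail (parseHex cs) cs.length by
    exact H cs.length cs rfl hval hne
  intro N
  induction N using Nat.strong_induction_on with
  | _ N ih =>
    intro cs hlen hval hne
    have hpos : 0 < cs.length := List.length_pos_iff.2 hne
    have hV0 := parseHex_nonneg cs
    have hVlt := parseHex_lt cs hval
    rw [chunksA_cons cs hne]
    by_cases hle : cs.length ≤ 16
    · have hd : cs.drop 16 = [] := List.drop_eq_nil_of_le hle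
      have ht : cs.take 16 = cs := List.take_of_length_le hle
      rw [hd, chunksA_nil, ht]
      simp only [List.map_cons, List.map_nil, List.reverse_cons, List.reverse_nil,
        List.nil_append]
      unfold bTail
      have hrT : PySem.Int.mod (cs.length : Int) 16 = ((cs.length % 16 : Nat) : Int) := by
        rw [PySem.Int.mod, Int.fmod_eq_emod_of_nonneg _ (by norm_num)]
        omega
      rw [hrT]
      by_cases h16 : cs.length = 16
      · rw [if_neg (by simp [h16])]
        rw [wordsGo, if_pos (by exact_mod_cast Nat.cast_pos.mpr hpos)]
        have e1 : PySem.Int.mod (parseHex cs) (2 ^ 64) = parseHex cs := by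
          rw [PySem.Int.mod, Int.fmod_eq_emod_of_nonneg _ (by positivity)]
          apply Int.emod_eq_of_lt hV0
          calc parseHex cs < 16 ^ cs.length := hVlt
            _ = 2 ^ 64 := by rw [h16]; norm_num
        rw [e1, h16]
        norm_num [wordsGo_stop]
      · have hlt : cs.length < 16 := by omega
        have hmod : cs.length % 16 = cs.length := Nat.mod_eq_of_lt hlt
        rw [if_pos (by rw [hmod]; exact_mod_cast Nat.cast_ne_zero.mpr (by omega))]
        have htn : (((cs.length % 16 : Nat) : Int)).toNat = cs.length := by omega
        rw [htn]
        have e1 : PySem.Int.mod (parseHex cs) (16 ^ cs.length) = parseHex cs := by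
          rw [PySem.Int.mod, Int.fmod_eq_emod_of_nonneg _ (by positivity)]
          exact Int.emod_eq_of_lt hV0 hVlt
        have e2 : (cs.length : Int) - ((cs.length % 16 : Nat) : Int) = 0 := by omega
        rw [e1, e2, wordsGo_stop]
    · rw [not_le] at hle
      have htlen : (cs.drop 16).length = cs.length - 16 := by simp
      have htne : cs.drop 16 ≠ [] := by
        intro hnil
        rw [hnil] at htlen
        simp at htlen
        omega
      have hklen : (cs.take 16).length = 16 := by
        simp
        omega
      have hcs : cs = cs.take 16 ++ cs.drop 16 := (List.take_append_drop 16 cs).symm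
      simp only [List.map_cons, List.reverse_cons]
      rw [ih (cs.drop 16).length (by omega) (cs.drop 16) rfl
        (fun c hc => hval c (List.mem_of_mem_drop hc)) htne]
      have hp0 : 0 ≤ parseHex (cs.take 16) := parseHex_nonneg _
      have hplt : parseHex (cs.take 16) < 16 ^ 16 := by
        have := parseHex_lt (cs.take 16) (fun c hc => hval c (List.mem_of_mem_take hc))
        rwa [hklen] at this
      have hw0 : 0 ≤ parseHex (cs.drop 16) := parseHex_nonneg _
      have hwlt : parseHex (cs.drop 16) < 16 ^ (cs.drop 16).length :=
        parseHex_lt _ (fun c hc => hval c (List.mem_of_mem_drop hc))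
      have hP : parseHex cs
          = parseHex (cs.take 16) * 16 ^ (cs.drop 16).length + parseHex (cs.drop 16) := by
        conv_lhs => rw [hcs]
        rw [parseHex_append]
      have hL : (cs.length : Int) = ((cs.drop 16).length : Int) + 16 := by
        rw [htlen]
        omega
      rw [hP, hL, bTail_step _ _ _ hp0 hplt hw0 hwlt (by omega)]

-- the A-side abbreviations: mask digit count, masked value, its hex length, final length, final value
def aKK (y : Int) : Nat := (pyHexNat y.natAbs).length + (if y < 0 then 1 else 0)
def aM (y : Int) : Int := PySem.Int.mod y (16 ^ (2 * aKK y))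
def aL0 (y : Int) : Nat := (pyHexNat (aM y).toNat).length
def aLB (y n : Int) : Int := if 16 * n < ((aL0 y : Nat) : Int) then ((aL0 y : Nat) : Int) else 16 * n
def aMB (y n : Int) : Int :=
  if y < 0 then aM y + 16 ^ (aLB y n).toNat - 16 ^ (((aL0 y : Nat) : Int)).toNat else aM y

theorem A_eq_bTail (y n : Int) : make_yarray y n = bTail (aMB y n) (aLB y n) := by
  have hkA : ((pyHexChars y).length : Int) - 2 = ((aKK y : Nat) : Int) := by
    unfold pyHexChars aKK
    by_cases hy : y < 0
    · rw [if_pos hy]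
      have hy' : (-y).toNat = y.natAbs := by omega
      rw [hy']
      simp only [List.length_append, List.length_cons, List.length_nil, if_pos hy]
      push_cast
      ring
    · rw [if_neg hy]
      have hy' : y.toNat = y.natAbs := by omega
      rw [hy']
      simp only [List.length_append, List.length_cons, List.length_nil, if_neg hy]
      push_cast
      ring
  have hpow1616 : (16:Int) ^ (2 * aKK y) = 2 ^ (8 * aKK y) := by
    rw [show (16:Int) = 2 ^ 4 by norm_num, ← pow_mul]
    congr 1
    ring
  have hmaskA : PySem.Int.band y (n_ff ((aKK y : Nat) : Int)) = aM y := by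
    rw [n_ff_eq (aKK y), hpow1616, band_mask, aM, hpow1616]
  have hm0 : 0 ≤ aM y := by
    rw [aM, PySem.Int.mod, Int.fmod_eq_emod_of_nonneg _ (by positivity)]
    exact Int.emod_nonneg _ (by positivity)
  have hmn : ((aM y).toNat : Int) = aM y := by omega
  have hL0pos : 0 < aL0 y := length_pyHexNat_pos _
  have hdrop : PySem.List.slice (pyHexChars (aM y)) (some 2) none = pyHexNat (aM y).toNat := by
    rw [PySem.List.slice_from _ (by norm_num : (0:Int) ≤ 2)]
    unfold pyHexChars
    rw [if_neg (by omega)]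
    rfl
  set c := (if 0 ≤ y then '0' else 'f') with hc
  set pnat := (16 * n - ((aL0 y : Nat) : Int)).toNat with hpnat
  set S := List.replicate pnat c ++ pyHexNat (aM y).toNat with hS
  have hpadS : padLoop y n (pyHexNat (aM y).toNat) = S := by
    rw [padLoop_eq]
    rfl
  have hSlen : S.length = pnat + aL0 y := by
    rw [hS, List.length_append, List.length_replicate]
    rfl
  have hLB : (S.length : Int) = aLB y n := by
    rw [hSlen, aLB]
    split <;> push_cast <;> omega
  have hLBt : (aLB y n).toNat = pnat + aL0 y := by
    have : 0 ≤ aLB y n := by rw [← hLB]; positivity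
    omega
  have hvalS : ∀ ch ∈ S, hexDigitVal ch < 16 := by
    intro ch hch
    rcases List.mem_append.1 hch with h | h
    · have := List.eq_of_mem_replicate h
      subst this
      rw [hc]
      split <;> decide
    · exact valid_pyHexNat _ ch h
  have hSne : S ≠ [] := by
    have : 0 < S.length := by
      rw [hSlen]
      omega
    exact List.length_pos_iff.1 this
  have hVS : parseHex S = aMB y n := by
    rw [hS, parseHex_append, parseHex_pyHexNat, hmn, aMB, hc, hLBt]
    have hL0t : (((aL0 y : Nat) : Int)).toNat = aL0 y := by omega
    rw [hL0t]
    by_cases hy : y < 0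
    · rw [if_neg (by omega), if_pos hy, parseHex_replicate_f, pow_add]
      unfold aL0
      ring
    · rw [if_pos (by omega), if_neg hy, parseHex_replicate_0]
      ring
  show ((chunksA (padLoop y n (PySem.List.slice
      (pyHexChars (PySem.Int.band y (n_ff (((pyHexChars y).length : Int) - 2)))) (some 2) none))
      (PySem.Int.floordiv (64 * 2) 8)).map parseHex).reverse = bTail (aMB y n) (aLB y n)
  rw [hkA, hmaskA, hdrop, hpadS,
    show PySem.Int.floordiv (64 * 2) 8 = 16 from by decide,
    AW_eq S hvalS hSne, hVS, hLB]

-- B-side evaluation lemmas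
theorem padBGo_spec (fl n : Int) (fuel : Nat) :
    ∀ ws : List Int, (n - ws.length).toNat ≤ fuel →
      padBGo fl n fuel ws = ws ++ List.replicate (n - ws.length).toNat fl := by
  induction fuel with
  | zero =>
    intro ws h
    have h0 : (n - (ws.length : Int)).toNat = 0 := by omega
    simp [padBGo, h0]
  | succ fuel ih =>
    intro ws h
    simp only [padBGo]
    by_cases hc : (ws.length : Int) < n
    · rw [if_pos hc]
      rw [ih _ (by simp only [List.length_append, List.length_cons, List.length_nil]; omega)]
      have h1 : (n - ((ws ++ [fl]).length : Int)).toNat + 1 = (n - ws.length).toNat := by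
        simp only [List.length_append, List.length_cons, List.length_nil]
        push_cast
        omega
      rw [← h1, List.replicate_succ]
      simp
    · rw [if_neg hc]
      have h0 : (n - (ws.length : Int)).toNat = 0 := by omega
      rw [h0]
      simp

theorem padB_eq (f n : Int) (ws : List Int) :
    padB f n ws = ws ++ List.replicate (n - ws.length).toNat f := by
  unfold padB
  exact padBGo_spec f n _ ws le_rfl

theorem bLoop_zero : bLoop 0 = [] := rfl

theorem bLoop_neg_one : bLoop (-1) = [] := by decide

theorem B_pos (y n : Int) (h0 : 0 ≤ y) (h : y ≤ 2147483648) :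
    make_yarray_alt y n = y :: List.replicate (n - 1).toNat 0 := by
  have h64 : (2:Int) ^ 64 = 18446744073709551616 := by norm_num
  have hband : PySem.Int.band y (2 ^ 64 - 1) = y := by
    rw [band_mask, PySem.Int.mod, Int.fmod_eq_emod_of_nonneg _ (by positivity)]
    exact Int.emod_eq_of_lt h0 (by rw [h64]; omega)
  have hdiv : PySem.Int.floordiv y (2 ^ 64) = 0 := by
    rw [PySem.Int.floordiv_eq_ediv_of_pos (by positivity)]
    exact Int.ediv_eq_zero_of_lt h0 (by rw [h64]; omega)
  show padB (if 0 ≤ y then 0 else 2 ^ 64 - 1) n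
      ([PySem.Int.band y (2 ^ 64 - 1)] ++ bLoop (PySem.Int.floordiv y (2 ^ 64))) = _
  rw [hband, hdiv, bLoop_zero, if_pos h0, padB_eq]
  simp

theorem B_neg (y n : Int) (h0 : y < 0) (h : -2147483648 ≤ y) :
    make_yarray_alt y n = (2 ^ 64 + y) :: List.replicate (n - 1).toNat (2 ^ 64 - 1) := by
  have h64 : (2:Int) ^ 64 = 18446744073709551616 := by norm_num
  have hband : PySem.Int.band y (2 ^ 64 - 1) = 2 ^ 64 + y := by
    rw [band_mask, PySem.Int.mod, Int.fmod_eq_emod_of_nonneg _ (by positivity)]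
    have e : y % 2 ^ 64 = (y + 2 ^ 64) % 2 ^ 64 := by
      conv_rhs => rw [show y + 2 ^ 64 = y + 2 ^ 64 * 1 from by ring, Int.add_mul_emod_self_left]
    rw [e, Int.emod_eq_of_lt (by rw [h64]; omega) (by rw [h64]; omega)]
    ring
  have hdiv : PySem.Int.floordiv y (2 ^ 64) = -1 := by
    rw [PySem.Int.floordiv_eq_ediv_of_pos (by positivity), h64]
    omega
  show padB (if 0 ≤ y then 0 else 2 ^ 64 - 1) n
      ([PySem.Int.band y (2 ^ 64 - 1)] ++ bLoop (PySem.Int.floordiv y (2 ^ 64))) = _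
  rw [hband, hdiv, bLoop_neg_one, if_neg (by omega), padB_eq]
  simp

-- wordsGo evaluation lemmas
theorem wordsGo_zero (k : Nat) : wordsGo 0 (16 * (k : Int)) = List.replicate k 0 := by
  induction k with
  | zero => simpa using wordsGo_stop 0
  | succ k ih =>
    rw [wordsGo, if_pos (by push_cast; omega)]
    have e1 : PySem.Int.mod 0 (2 ^ 64) = 0 := by
      rw [PySem.Int.mod, Int.fmod_eq_emod_of_nonneg _ (by positivity)]
      simp
    have e2 : PySem.Int.floordiv 0 (2 ^ 64) = 0 := by
      rw [PySem.Int.floordiv_eq_ediv_of_pos (by positivity)]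
      simp
    have e3 : 16 * ((k + 1 : Nat) : Int) - 16 = 16 * (k : Int) := by push_cast; try ring
    rw [e1, e2, e3, ih, List.replicate_succ]

theorem wordsGo_pos (k : Nat) (w : Int) (h0 : 0 ≤ w) (h1 : w < 2 ^ 64) (hk : 1 ≤ k) :
    wordsGo w (16 * (k : Int)) = w :: List.replicate (k - 1) 0 := by
  obtain ⟨k', rfl⟩ : ∃ k', k = k' + 1 := ⟨k - 1, by omega⟩
  rw [wordsGo, if_pos (by push_cast; omega)]
  have e1 : PySem.Int.mod w (2 ^ 64) = w := by
    rw [PySem.Int.mod, Int.fmod_eq_emod_of_nonneg _ (by positivity)]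
    exact Int.emod_eq_of_lt h0 h1
  have e2 : PySem.Int.floordiv w (2 ^ 64) = 0 := by
    rw [PySem.Int.floordiv_eq_ediv_of_pos (by positivity)]
    exact Int.ediv_eq_zero_of_lt h0 h1
  have e3 : 16 * ((k' + 1 : Nat) : Int) - 16 = 16 * (k' : Int) := by push_cast; try ring
  rw [e1, e2, e3, wordsGo_zero]
  simp

theorem wordsGo_neg (k : Nat) (y : Int) (h1 : -(2 ^ 64) ≤ y) (h2 : y < 0) (hk : 1 ≤ k) :
    wordsGo (16 ^ (16 * k) + y) (16 * (k : Int))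
      = (2 ^ 64 + y) :: List.replicate (k - 1) (2 ^ 64 - 1) := by
  induction k generalizing y with
  | zero => omega
  | succ k ih =>
    have hpow : (16:Int) ^ (16 * (k + 1)) = 2 ^ 64 * 16 ^ (16 * k) := by
      rw [show 16 * (k + 1) = 16 + 16 * k from by ring, pow_add]
      norm_num
    have hpk : (1:Int) ≤ 16 ^ (16 * k) := one_le_pow₀ (by norm_num)
    rw [wordsGo, if_pos (by push_cast; omega)]
    have e1 : PySem.Int.mod (16 ^ (16 * (k + 1)) + y) (2 ^ 64) = 2 ^ 64 + y := by
      rw [PySem.Int.mod, Int.fmod_eq_emod_of_nonneg _ (by positivity), hpow]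
      have e : (2 ^ 64 * 16 ^ (16 * k) + y) % 2 ^ 64 = (y + 2 ^ 64) % 2 ^ 64 := by
        rw [show 2 ^ 64 * 16 ^ (16 * k) + y = (y + 2 ^ 64) + (2:Int) ^ 64 * (16 ^ (16 * k) - 1)
          from by ring, Int.add_mul_emod_self_left]
      rw [e, Int.emod_eq_of_lt (by omega) (by omega)]
      ring
    have e2 : PySem.Int.floordiv (16 ^ (16 * (k + 1)) + y) (2 ^ 64)
        = 16 ^ (16 * k) + (-1) := by
      rw [PySem.Int.floordiv_eq_ediv_of_pos (by positivity : (0:Int) < 2 ^ 64), hpow]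
      have e : 2 ^ 64 * 16 ^ (16 * k) + y = (y + 2 ^ 64) + 2 ^ 64 * (16 ^ (16 * k) - 1) := by
        ring
      rw [e, Int.add_mul_ediv_left _ _ (by positivity : (2:Int) ^ 64 ≠ 0),
        Int.ediv_eq_zero_of_lt (by omega) (by omega)]
      ring
    have e3 : 16 * ((k + 1 : Nat) : Int) - 16 = 16 * (k : Int) := by push_cast; try ring
    rw [e1, e2, e3]
    by_cases hk0 : k = 0
    · subst hk0
      simp only [Nat.cast_zero, mul_zero, pow_zero]
      rw [show (1:Int) + -1 = 0 from by ring, wordsGo_stop]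
      simp
    · rw [ih (-1) (by omega) (by omega) (by omega)]
      have : (2:Int) ^ 64 + -1 = 2 ^ 64 - 1 := by ring
      rw [this]
      have hrep : List.replicate (k + 1 - 1) ((2:Int) ^ 64 - 1)
          = (2 ^ 64 - 1) :: List.replicate (k - 1) (2 ^ 64 - 1) := by
        have : k + 1 - 1 = (k - 1) + 1 := by omega
        rw [this, List.replicate_succ]
      rw [hrep]

-- d-analysis shared by the remaining proofs (y < 0 case); d = hex digit count of |y|
theorem neg_setup (y : Int) (h0 : y < 0) (hlo : -2147483648 ≤ y) :
    let d := (pyHexNat y.natAbs).length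
    aKK y = d + 1 ∧ aM y = 16 ^ (2 * d + 2) + y ∧ aL0 y = 2 * d + 2 ∧ 1 ≤ d ∧ d ≤ 8 := by
  intro d
  have hv1 : 1 ≤ y.natAbs := by omega
  have hdpos : 1 ≤ d := length_pyHexNat_pos _
  have hup : y.natAbs < 16 ^ d := pyHexNat_lt_pow _
  have hlo' : 16 ^ (d - 1) ≤ y.natAbs := pyHexNat_pow_le _ hv1
  have hd8 : d ≤ 8 := pyHexNat_len_le y.natAbs 8 (by norm_num) (by
    have : (16:Nat) ^ 8 = 4294967296 := by norm_num
    omega)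
  have hkk : aKK y = d + 1 := by
    unfold aKK
    rw [if_pos h0]
  have hupI : -y < 16 ^ d := by
    have h1 : ((y.natAbs : Int)) < ((16 ^ d : Nat) : Int) := Int.ofNat_lt.mpr hup
    have h2 : ((16 ^ d : Nat) : Int) = (16:Int) ^ d := by push_cast; try ring
    omega
  have hmono : (16:Int) ^ d ≤ 16 ^ (2 * d + 2) :=
    pow_le_pow_right₀ (by norm_num) (by omega)
  have hm : aM y = 16 ^ (2 * d + 2) + y := by
    rw [aM, hkk, show 2 * (d + 1) = 2 * d + 2 from by ring, PySem.Int.mod,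
      Int.fmod_eq_emod_of_nonneg _ (by positivity)]
    have e : y % 16 ^ (2 * d + 2) = (y + 16 ^ (2 * d + 2)) % 16 ^ (2 * d + 2) := by
      conv_rhs => rw [show y + 16 ^ (2 * d + 2) = y + 16 ^ (2 * d + 2) * 1 from by ring,
        Int.add_mul_emod_self_left]
    rw [e, Int.emod_eq_of_lt (by omega) (by omega)]
    ring
  have hL0 : aL0 y = 2 * d + 2 := by
    unfold aL0
    rw [hm]
    apply pyHexNat_len_eq _ (2 * d + 1)
    · -- 16^(2d+1) ≤ (16^(2d+2)+y).toNat
      have h15 : (15:Int) * 16 ^ (2 * d + 1) ≥ 16 ^ d := by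
        have : (16:Int) ^ d ≤ 16 ^ (2 * d + 1) := pow_le_pow_right₀ (by norm_num) (by omega)
        nlinarith [this]
      have hsplit : (16:Int) ^ (2 * d + 2) = 16 * 16 ^ (2 * d + 1) := by
        rw [pow_succ]
        ring
      have hlb : (16:Int) ^ (2 * d + 1) ≤ 16 ^ (2 * d + 2) + y := by nlinarith [hupI]
      have hcast : ((16 ^ (2 * d + 1) : Nat) : Int) = (16:Int) ^ (2 * d + 1) := by push_cast; try ring
      omega
    · have hcast : ((16 ^ (2 * d + 2) : Nat) : Int) = (16:Int) ^ (2 * d + 2) := by push_cast; try ring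
      have : (2 * d + 1) + 1 = 2 * d + 2 := by ring
      rw [this]
      omega
  exact ⟨hkk, hm, hL0, hdpos, hd8⟩

-- main agreement proof
theorem main_unchanged (y n : Int) (hDom : Dom_make_yarray y n)
    (hnD : ¬ D_make_yarray y n) : make_yarray y n = make_yarray_alt y n := by
  have hyb : -2147483648 ≤ y ∧ y ≤ 2147483648 := by
    unfold Dom_make_yarray pvDomInt at hDom
    simp only [Bool.and_eq_true, decide_eq_true_eq] at hDom
    exact hDom.1
  rw [A_eq_bTail]
  by_cases hy : 0 ≤ y
  · -- y ≥ 0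
    rw [B_pos y n hy hyb.2]
    have hnabs : y.natAbs = y.toNat := by omega
    set d := (pyHexNat y.toNat).length with hd
    have hdpos : 1 ≤ d := length_pyHexNat_pos _
    have hd8 : d ≤ 8 := pyHexNat_len_le y.toNat 8 (by norm_num) (by
      have : (16:Nat) ^ 8 = 4294967296 := by norm_num
      omega)
    have hup : y < 16 ^ d := by
      have h1 := pyHexNat_lt_pow y.toNat
      rw [← hd] at h1
      have h2 : (y.toNat : Int) < ((16 ^ d : Nat) : Int) := Int.ofNat_lt.mpr h1
      have hc : ((16 ^ d : Nat) : Int) = (16:Int) ^ d := by push_cast; try ring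
      omega
    have hkk : aKK y = d := by
      unfold aKK
      rw [if_neg (by omega), hnabs]
      omega
    have hm : aM y = y := by
      rw [aM, hkk, PySem.Int.mod, Int.fmod_eq_emod_of_nonneg _ (by positivity)]
      exact Int.emod_eq_of_lt hy (lt_of_lt_of_le hup (pow_le_pow_right₀ (by norm_num) (by omega)))
    have hL0 : aL0 y = d := by
      unfold aL0
      rw [hm]
      try omega
    have hmb : aMB y n = y := by
      rw [aMB, if_neg (by omega), hm]
    rw [hmb]
    by_cases hn : n ≤ 0
    · have hLB : aLB y n = (d : Int) := by
        rw [aLB, hL0, if_pos (by omega)]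
      rw [hLB]
      unfold bTail
      have hr : PySem.Int.mod (d : Int) 16 = (d : Int) := by
        rw [PySem.Int.mod, Int.fmod_eq_emod_of_nonneg _ (by norm_num)]
        omega
      rw [hr, if_pos (by omega)]
      have htn : ((d : Int)).toNat = d := by omega
      rw [htn]
      have e1 : PySem.Int.mod y (16 ^ d) = y := by
        rw [PySem.Int.mod, Int.fmod_eq_emod_of_nonneg _ (by positivity)]
        exact Int.emod_eq_of_lt hy hup
      have e2 : PySem.Int.floordiv y (16 ^ d) = 0 := by
        rw [PySem.Int.floordiv_eq_ediv_of_pos (by positivity)]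
        exact Int.ediv_eq_zero_of_lt hy hup
      have e3 : (d : Int) - (d : Int) = 0 := by ring
      rw [e1, e2, e3, wordsGo_stop]
      have : (n - 1).toNat = 0 := by omega
      simp [this]
    · push_neg at hn
      have hLB : aLB y n = 16 * n := by
        rw [aLB, hL0, if_neg (by omega)]
      rw [hLB]
      unfold bTail
      have hr : PySem.Int.mod (16 * n) 16 = 0 := by
        rw [PySem.Int.mod, Int.fmod_eq_emod_of_nonneg _ (by norm_num)]
        omega
      rw [hr, if_neg (by omega)]
      have hcast : 16 * n = 16 * ((n.toNat : Nat) : Int) := by omega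
      rw [hcast, wordsGo_pos n.toNat y hy (by
          have : (16:Int) ^ d ≤ 2 ^ 64 := by
            calc (16:Int) ^ d ≤ 16 ^ 8 := pow_le_pow_right₀ (by norm_num) hd8
              _ ≤ 2 ^ 64 := by norm_num
          omega) (by omega)]
      congr 1
      congr 1
      omega
  · -- y < 0
    push_neg at hy
    rw [B_neg y n hy hyb.1]
    obtain ⟨hkk, hm, hL0, hdpos, hd8⟩ := neg_setup y hy hyb.1
    set d := (pyHexNat y.natAbs).length with hd
    have hD' : (n ≤ 0 → (16 ^ 6 ≤ -y ∧ -y < 16 ^ 7)) ∧ (n = 1 → -y < 16 ^ 7) := by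
      constructor
      · intro h
        by_contra hc
        exact hnD ⟨hy, Or.inl ⟨h, hc⟩⟩
      · intro h
        by_contra hc
        push_neg at hc
        exact hnD ⟨hy, Or.inr ⟨h, hc⟩⟩
    -- translate -y bounds into d
    have hdof : ∀ k : Nat, 16 ^ k ≤ -y → -y < 16 ^ (k + 1) → d = k + 1 := by
      intro k h1 h2
      have c1 : (16:Nat) ^ k ≤ y.natAbs := by
        have hc : ((16 ^ k : Nat) : Int) = (16:Int) ^ k := by push_cast; try ring
        omega
      have c2 : y.natAbs < 16 ^ (k + 1) := by
        have hc : ((16 ^ (k + 1) : Nat) : Int) = (16:Int) ^ (k + 1) := by push_cast; try ring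
        omega
      exact pyHexNat_len_eq _ _ c1 c2
    by_cases hn1 : n ≤ 1
    · -- LB = 16, one word
      have hdle7 : 2 * d + 2 ≤ 16 := by
        by_cases hn0 : n ≤ 0
        · obtain ⟨ha, hb⟩ := hD'.1 hn0
          have := hdof 6 ha hb
          omega
        · have hn1' : n = 1 := by omega
          have hb := hD'.2 hn1'
          have : d ≤ 7 := pyHexNat_len_le y.natAbs 7 (by norm_num) (by
            have hc : ((16 ^ 7 : Nat) : Int) = (16:Int) ^ 7 := by push_cast; try ring
            omega)
          omega
      have hLB : aLB y n = 16 := by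
        rw [aLB, hL0]
        by_cases hn0 : 16 * n < ((2 * d + 2 : Nat) : Int)
        · rw [if_pos hn0]
          obtain ⟨ha, hb⟩ := hD'.1 (by
            by_contra hc
            push_neg at hc
            have : n = 1 := by omega
            subst this
            push_cast at hn0
            omega)
          have := hdof 6 ha hb
          omega
        · rw [if_neg hn0]
          push_cast at hn0
          omega
      have hmb : aMB y n = 16 ^ 16 + y := by
        rw [aMB, if_pos hy, hm, hL0, hLB]
        have e1 : ((16:Int)).toNat = 16 := by decide
        have e2 : (((2 * d + 2 : Nat) : Int)).toNat = 2 * d + 2 := by omega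
        rw [e1, e2]
        ring
      rw [hLB, hmb]
      unfold bTail
      have hr : PySem.Int.mod (16 : Int) 16 = 0 := by decide
      rw [hr, if_neg (by omega)]
      have hw := wordsGo_neg 1 y (by omega) hy (by omega)
      have hn0' : (n - 1).toNat = 0 := by omega
      rw [hn0']
      calc wordsGo (16 ^ 16 + y) 16
          = wordsGo (16 ^ (16 * 1) + y) (16 * ((1 : Nat) : Int)) := by norm_num
        _ = (2 ^ 64 + y) :: List.replicate (1 - 1) (2 ^ 64 - 1) := hw
        _ = (2 ^ 64 + y) :: List.replicate 0 (2 ^ 64 - 1) := by norm_num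
    · -- n ≥ 2, LB = 16n
      push_neg at hn1
      have hLB : aLB y n = 16 * n := by
        rw [aLB, hL0, if_neg (by push_cast; omega)]
      have htn : (16 * n).toNat = 16 * n.toNat := by omega
      have hmb : aMB y n = 16 ^ (16 * n.toNat) + y := by
        rw [aMB, if_pos hy, hm, hL0, hLB, htn]
        have e2 : (((2 * d + 2 : Nat) : Int)).toNat = 2 * d + 2 := by omega
        rw [e2]
        ring
      rw [hLB, hmb]
      unfold bTail
      have hr : PySem.Int.mod (16 * n) 16 = 0 := by
        rw [PySem.Int.mod, Int.fmod_eq_emod_of_nonneg _ (by norm_num)]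
        omega
      rw [hr, if_neg (by omega)]
      have hcast : 16 * n = 16 * ((n.toNat : Nat) : Int) := by omega
      rw [hcast, wordsGo_neg n.toNat y (by omega) hy (by omega)]
      congr 1
      congr 1
      omega

-- difference proof: inside D_ the two programs disagree everywhere
theorem main_tight (y n : Int) (hDom : Dom_make_yarray y n)
    (hD : D_make_yarray y n) : make_yarray y n ≠ make_yarray_alt y n := by
  have hyb : -2147483648 ≤ y ∧ y ≤ 2147483648 := by
    unfold Dom_make_yarray pvDomInt at hDom
    simp only [Bool.and_eq_true, decide_eq_true_eq] at hDom
    exact hDom.1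
  obtain ⟨hy, hcase⟩ := hD
  have hn1 : n ≤ 1 := by
    rcases hcase with ⟨h, _⟩ | ⟨h, _⟩ <;> omega
  rw [A_eq_bTail, B_neg y n hy hyb.1]
  have hBrep : (n - 1).toNat = 0 := by omega
  rw [hBrep]
  obtain ⟨hkk, hm, hL0, hdpos, hd8⟩ := neg_setup y hy hyb.1
  set d := (pyHexNat y.natAbs).length with hd
  have hdof : ∀ k : Nat, 16 ^ k ≤ -y → -y < 16 ^ (k + 1) → d = k + 1 := by
    intro k h1 h2
    have c1 : (16:Nat) ^ k ≤ y.natAbs := by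
      have hc : ((16 ^ k : Nat) : Int) = (16:Int) ^ k := by push_cast; try ring
      omega
    have c2 : y.natAbs < 16 ^ (k + 1) := by
      have hc : ((16 ^ (k + 1) : Nat) : Int) = (16:Int) ^ (k + 1) := by push_cast; try ring
      omega
    exact pyHexNat_len_eq _ _ c1 c2
  have hd7 : d ≠ 7 ∨ 16 ^ 7 ≤ -y := by
    rcases hcase with ⟨_, h⟩ | ⟨_, h⟩
    · left
      intro hc
      apply h
      constructor
      · have := pyHexNat_pow_le y.natAbs (by omega)
        rw [← hd, hc] at this
        have hcast : ((16 ^ 6 : Nat) : Int) = (16:Int) ^ 6 := by push_cast; try ring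
        omega
      · have := pyHexNat_lt_pow y.natAbs
        rw [← hd, hc] at this
        have hcast : ((16 ^ 7 : Nat) : Int) = (16:Int) ^ 7 := by push_cast; try ring
        omega
    · right
      exact h
  by_cases hd8' : 16 ^ 7 ≤ -y
  · -- d = 8: A has two words, B one
    have hdval : d = 8 := hdof 7 hd8' (by
      have : (16:Int) ^ 8 = 4294967296 := by norm_num
      omega)
    have hLB : aLB y n = 18 := by
      rw [aLB, hL0, hdval, if_pos (by push_cast; omega)]
      norm_num
    have hmb : aMB y n = 16 ^ 18 + y := by
      rw [aMB, if_pos hy, hm, hL0, hLB, hdval]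
      norm_num
    rw [hLB, hmb]
    unfold bTail
    have hr : PySem.Int.mod (18 : Int) 16 = 2 := by decide
    rw [hr, if_pos (by omega)]
    rw [wordsGo, if_pos (by norm_num : (0:Int) < 18 - 2)]
    rw [show (18:Int) - 2 - 16 = 0 from by norm_num, wordsGo_stop]
    intro hcontra
    have := congrArg List.length hcontra
    simp at this
  · -- d ≤ 6: single misaligned narrow word
    have hd7' : d ≠ 7 := by tauto
    have hdle : d ≤ 6 := by
      by_contra hc
      push_neg at hc
      have h7 : 7 ≤ d := by omega
      have := pyHexNat_pow_le y.natAbs (by omega)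
      rw [← hd] at this
      have h16 : (16:Nat) ^ 7 ≤ 16 ^ (d - 1) ∨ d = 7 := by
        by_cases hdq : d = 7
        · right; exact hdq
        · left
          exact Nat.pow_le_pow_right (by norm_num) (by omega)
      rcases h16 with h16 | h16
      · apply hd8'
        have hcast : ((16 ^ 7 : Nat) : Int) = (16:Int) ^ 7 := by push_cast; try ring
        omega
      · exact hd7' h16
    have hn0 : n ≤ 0 := by
      rcases hcase with ⟨h, _⟩ | ⟨_, h⟩
      · exact h
      · exfalso
        exact hd8' h
    have hLB : aLB y n = ((2 * d + 2 : Nat) : Int) := by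
      rw [aLB, hL0, if_pos (by push_cast; omega)]
    have hmb : aMB y n = 16 ^ (2 * d + 2) + y := by
      rw [aMB, if_pos hy, hm, hL0, hLB]
      ring
    rw [hLB, hmb]
    unfold bTail
    have hrv : (2 * d + 2) % 16 = 2 * d + 2 := Nat.mod_eq_of_lt (by omega)
    have hr : PySem.Int.mod ((2 * d + 2 : Nat) : Int) 16 = ((2 * d + 2 : Nat) : Int) := by
      rw [PySem.Int.mod, Int.fmod_eq_emod_of_nonneg _ (by norm_num)]
      omega
    rw [hr, if_pos (by push_cast; omega)]
    have htn : (((2 * d + 2 : Nat) : Int)).toNat = 2 * d + 2 := by omega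
    rw [htn]
    have hup : -y < 16 ^ d := by
      have := pyHexNat_lt_pow y.natAbs
      rw [← hd] at this
      have hcast : ((16 ^ d : Nat) : Int) = (16:Int) ^ d := by push_cast; try ring
      omega
    have hmono : (16:Int) ^ d ≤ 16 ^ (2 * d + 2) := pow_le_pow_right₀ (by norm_num) (by omega)
    have hin : 0 ≤ 16 ^ (2 * d + 2) + y ∧ 16 ^ (2 * d + 2) + y < 16 ^ (2 * d + 2) := by
      constructor <;> omega
    have e1 : PySem.Int.mod (16 ^ (2 * d + 2) + y) (16 ^ (2 * d + 2)) = 16 ^ (2 * d + 2) + y := by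
      rw [PySem.Int.mod, Int.fmod_eq_emod_of_nonneg _ (by positivity)]
      exact Int.emod_eq_of_lt hin.1 hin.2
    have e2 : PySem.Int.floordiv (16 ^ (2 * d + 2) + y) (16 ^ (2 * d + 2)) = 0 := by
      rw [PySem.Int.floordiv_eq_ediv_of_pos (by positivity)]
      exact Int.ediv_eq_zero_of_lt hin.1 hin.2
    have e3 : ((2 * d + 2 : Nat) : Int) - ((2 * d + 2 : Nat) : Int) = 0 := by ring
    rw [e1, e2, e3, wordsGo_stop]
    intro hcontra
    have hhead : (16:Int) ^ (2 * d + 2) + y = 2 ^ 64 + y := by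
      have := List.head_eq_of_cons_eq hcontra
      exact this
    have hlt : (16:Int) ^ (2 * d + 2) < 2 ^ 64 := by
      calc (16:Int) ^ (2 * d + 2) ≤ 16 ^ 14 := pow_le_pow_right₀ (by norm_num) (by omega)
        _ < 2 ^ 64 := by norm_num
    omega

-- witness evaluation (the ports use well-founded recursion, so `decide` cannot run them;
-- we evaluate them through the lemmas above)
theorem witness_A : make_yarray (-1) 0 = [65535] := by
  rw [A_eq_bTail]
  have hkk : aKK (-1) = 2 := by
    unfold aKK
    have h1 : ((-1 : Int)).natAbs = 1 := by decide
    rw [h1, pyHexNat_len_eq 1 0 (by norm_num) (by norm_num), if_pos (by norm_num : (-1:Int) < 0)]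
  have hm : aM (-1) = 65535 := by
    rw [aM, hkk]
    decide
  have hL0 : aL0 (-1) = 4 := by
    rw [aL0, hm]
    have h2 : ((65535:Int)).toNat = 65535 := by decide
    rw [h2]
    exact pyHexNat_len_eq 65535 3 (by norm_num) (by norm_num)
  have hLB : aLB (-1) 0 = 4 := by
    rw [aLB, hL0]
    norm_num
  have hmb : aMB (-1) 0 = 65535 := by
    rw [aMB, if_pos (by norm_num : (-1:Int) < 0), hm, hL0, hLB]
    norm_num
  rw [hLB, hmb]
  unfold bTail
  have hr : PySem.Int.mod (4:Int) 16 = 4 := by decide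
  rw [hr, if_pos (by norm_num)]
  have h4 : ((4:Int)).toNat = 4 := by decide
  rw [h4]
  have e1 : PySem.Int.mod 65535 ((16:Int) ^ 4) = 65535 := by decide
  have e2 : PySem.Int.floordiv 65535 ((16:Int) ^ 4) = 0 := by decide
  rw [e1, e2, show (4:Int) - 4 = 0 from by norm_num, wordsGo_stop]

theorem witness_B : make_yarray_alt (-1) 0 = [18446744073709551615] := by
  rw [B_neg (-1) 0 (by norm_num) (by norm_num)]
  norm_num

-- ===== VERDICT (by name: the statements are the Claim_ definitions above) =====
theorem make_yarray_spec : Claim_unchanged_make_yarray := by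
  intro y n hDom hnD
  exact main_unchanged y n hDom hnD

theorem make_yarray_changed : Claim_changed_make_yarray := by
  unfold Claim_changed_make_yarray
  exact ⟨by decide, by decide, witness_A, witness_B, by decide⟩

theorem make_yarray_tight : Claim_exact_make_yarray := by
  intro y n hDom hD
  exact main_tight y n hDom hD
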